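-- pv_equiv track=rewrite | github.com/flysaint/nowCode | BaseAlgorithm/Class02/Code02_SmallSum.py | mergSum
-- ===== SOURCE A (Python) =====
-- def mergSum(L_lst,R_lst):
--     helpArr = []
--     p1 = 0
--     p2 = 0
--     mergSumNum = 0
--     while(p1 < len(L_lst) and p2 < len(R_lst)):
--         if (L_lst[p1] < R_lst[p2]):
--             mergSumNum = mergSumNum + (len(R_lst) - p2)*L_lst[p1]
--             helpArr.append(L_lst[p1])
--             p1 = p1 + 1
--         else:
--             helpArr.append(R_lst[p2])
--             p2 = p2 + 1
--
--     while(p1 < len(L_lst)):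
--         helpArr.append(L_lst[p1])
--         p1 = p1 + 1
--
--     while(p2 < len(R_lst)):
--         helpArr.append(R_lst[p2])
--         p2 = p2 + 1
--
--     return   mergSumNum,helpArr
-- ===== SOURCE B (Python) =====
-- def mergSum(L_lst, R_lst):
--     # Stage 1: one uniform selection loop over the total length, merging with origin tags.
--     n, m = len(L_lst), len(R_lst)
--     i = j = 0
--     tagged = []
--     for _ in range(n + m):
--         take_l = j >= m or (i < n and L_lst[i] < R_lst[j])
--         if take_l:
--             tagged.append((L_lst[i], True))
--             i += 1
--         else:
--             tagged.append((R_lst[j], False))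
--             j += 1
--     # Stage 2: recover the small-sum from the merged sequence itself, scanning backward:
--     # each L-tagged value contributes value * (number of R-tagged elements after it).
--     total = 0
--     r_after = 0
--     for v, from_l in reversed(tagged):
--         if from_l:
--             total += v * r_after
--         else:
--             r_after += 1
--     return total, [v for v, _ in tagged]
-- ===== Notes on version B (the rewrite author's own statement) =====
-- stated objective: alternative
-- what changed: B merges with origin tags in one uniform loop over range(n+m) driven by a selection predicate, then recovers the small-sum afterwards in a backward scan that counts R-tagged successors of each L-tagged value, instead of A's three-phase two-pointer loop that accumulates x*(len(R)-p2) inline during the merge.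
import Mathlib
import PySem

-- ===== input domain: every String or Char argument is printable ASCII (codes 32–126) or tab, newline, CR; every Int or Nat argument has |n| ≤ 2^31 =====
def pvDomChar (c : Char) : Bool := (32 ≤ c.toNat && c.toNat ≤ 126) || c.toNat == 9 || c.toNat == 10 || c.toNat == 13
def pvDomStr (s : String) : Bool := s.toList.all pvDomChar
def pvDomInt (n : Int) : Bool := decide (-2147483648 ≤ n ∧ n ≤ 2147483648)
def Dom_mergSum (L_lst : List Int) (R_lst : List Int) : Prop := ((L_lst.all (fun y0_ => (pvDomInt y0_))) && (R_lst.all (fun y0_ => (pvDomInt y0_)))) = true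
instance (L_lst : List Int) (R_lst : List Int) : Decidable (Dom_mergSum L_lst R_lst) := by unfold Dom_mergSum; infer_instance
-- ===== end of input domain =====

-- B merges with origin tags in one uniform selection loop and recovers the small-sum in a
-- second, backward scan counting R-tagged successors, instead of A's three-phase
-- two-pointer loop that accumulates the sum inline (alternative decomposition, same cost).

-- ===== PORT A =====
-- the trailing 'while(p < len(xs)): helpArr.append(xs[p]); p += 1' loops
def pvTailLoopA (xs : List Int) (p : Nat) (arr : List Int) : List Int :=
  if h : p < xs.length then pvTailLoopA xs (p + 1) (arr ++ [xs.getD p 0]) else arr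
termination_by xs.length - p

-- the main merge loop over pointers p1, p2
def pvMergeLoopA (L_lst R_lst : List Int) (p1 p2 : Nat) (mergSumNum : Int)
    (helpArr : List Int) : Int × List Int :=
  if h : p1 < L_lst.length ∧ p2 < R_lst.length then
    if L_lst.getD p1 0 < R_lst.getD p2 0 then
      pvMergeLoopA L_lst R_lst (p1 + 1) p2
        (mergSumNum + ((R_lst.length : Int) - (p2 : Int)) * L_lst.getD p1 0)
        (helpArr ++ [L_lst.getD p1 0])
    else
      pvMergeLoopA L_lst R_lst p1 (p2 + 1) mergSumNum (helpArr ++ [R_lst.getD p2 0])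
  else
    (mergSumNum, pvTailLoopA R_lst p2 (pvTailLoopA L_lst p1 helpArr))
termination_by (L_lst.length - p1) + (R_lst.length - p2)
decreasing_by all_goals omega

def mergSum (L_lst : List Int) (R_lst : List Int) : Int × List Int :=
  pvMergeLoopA L_lst R_lst 0 0 0 []

-- ===== PORT B =====
-- one iteration of B's 'for _ in range(n + m)' selection loop (state: i, j, tagged)
def pvStepB (L R : List Int) (st : Nat × Nat × List (Int × Bool)) :
    Nat × Nat × List (Int × Bool) :=
  let i := st.1
  let j := st.2.1
  let tagged := st.2.2
  let take_l := decide (j ≥ R.length) ||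
    (decide (i < L.length) && decide (L.getD i 0 < R.getD j 0))
  if take_l then (i + 1, j, tagged ++ [(L.getD i 0, true)])
  else (i, j + 1, tagged ++ [(R.getD j 0, false)])

def mergSum_alt (L_lst : List Int) (R_lst : List Int) : Int × List Int :=
  let n := L_lst.length
  let m := R_lst.length
  let st := (List.range (n + m)).foldl (fun st _ => pvStepB L_lst R_lst st) (0, 0, [])
  let tagged := st.2.2
  let pr := tagged.reverse.foldl
    (fun (tc : Int × Int) (vb : Int × Bool) =>
      if vb.2 then (tc.1 + vb.1 * tc.2, tc.2) else (tc.1, tc.2 + 1)) (0, 0)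
  (pr.1, tagged.map Prod.fst)

-- ===== PRECONDITION & SPEC =====
def Spec_mergSum (L_lst : List Int) (R_lst : List Int) (out : Int × List Int) : Prop := out = mergSum_alt L_lst R_lst
instance (L_lst : List Int) (R_lst : List Int) (out : Int × List Int) : Decidable (Spec_mergSum L_lst R_lst out) := by unfold Spec_mergSum; infer_instance

-- ===== CLAIM (what is proved, stated in full; the proofs are below) =====
def Claim_equal_mergSum : Prop := ∀ (L_lst : List Int) (R_lst : List Int), Dom_mergSum L_lst R_lst → Spec_mergSum L_lst R_lst (mergSum L_lst R_lst)

-- ===== LEMMAS AND PROOFS =====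

-- suffix-style reformulation of A's merge loop, used only in the proof
def pvMergeS (l r : List Int) (s : Int) (arr : List Int) : Int × List Int :=
  match l, r with
  | x :: ls, y :: rs =>
      if x < y then pvMergeS ls (y :: rs) (s + ((y :: rs).length : Int) * x) (arr ++ [x])
      else pvMergeS (x :: ls) rs s (arr ++ [y])
  | l, r => (s, (arr ++ l) ++ r)
termination_by l.length + r.length

-- the tagged merge both programs implement (tag = came from the left list)
def pvTagMerge : List Int → List Int → List (Int × Bool)
  | x :: ls, y :: rs =>
      if x < y then (x, true) :: pvTagMerge ls (y :: rs)
      else (y, false) :: pvTagMerge (x :: ls) rs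
  | l, [] => l.map (fun x => (x, true))
  | [], r => r.map (fun y => (y, false))

-- B's backward scan as a recursion on the tagged sequence: (total, count of R tags)
def pvSufSum : List (Int × Bool) → Int × Int
  | [] => (0, 0)
  | (v, b) :: t =>
      let p := pvSufSum t
      if b then (p.1 + v * p.2, p.2) else (p.1, p.2 + 1)

theorem pvTailLoopA_eq (xs : List Int) (p : Nat) (arr : List Int) :
    pvTailLoopA xs p arr = arr ++ xs.drop p := by
  fun_induction pvTailLoopA xs p arr with
  | case1 p arr h ih =>
      rw [ih, List.drop_eq_getElem_cons h]
      simp [List.getD_eq_getElem?_getD, List.getElem?_eq_getElem h]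
  | case2 p arr h =>
      have hle : xs.length ≤ p := by omega
      simp [List.drop_eq_nil_of_le hle]

theorem pvMergeLoopA_eq_pvMergeS (L R : List Int) (p1 p2 : Nat) (s : Int) (arr : List Int) :
    pvMergeLoopA L R p1 p2 s arr = pvMergeS (L.drop p1) (R.drop p2) s arr := by
  fun_induction pvMergeLoopA L R p1 p2 s arr with
  | case1 p1 p2 s arr h hlt ih =>
      have e1 : L.getD p1 0 = L[p1] := by
        simp [List.getD_eq_getElem?_getD, List.getElem?_eq_getElem h.1]
      have e2 : R.getD p2 0 = R[p2] := by
        simp [List.getD_eq_getElem?_getD, List.getElem?_eq_getElem h.2]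
      rw [ih, List.drop_eq_getElem_cons h.1, List.drop_eq_getElem_cons h.2, pvMergeS]
      simp only [e1, e2] at hlt ⊢
      rw [if_pos hlt]
      have hlen : ((R[p2] :: R.drop (p2 + 1)).length : Int) = (R.length : Int) - (p2 : Int) := by
        have := h.2
        simp [List.length_drop]
        omega
      rw [hlen]
  | case2 p1 p2 s arr h hlt ih =>
      have e1 : L.getD p1 0 = L[p1] := by
        simp [List.getD_eq_getElem?_getD, List.getElem?_eq_getElem h.1]
      have e2 : R.getD p2 0 = R[p2] := by
        simp [List.getD_eq_getElem?_getD, List.getElem?_eq_getElem h.2]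
      rw [ih, List.drop_eq_getElem_cons h.1, List.drop_eq_getElem_cons h.2, pvMergeS]
      simp only [e1, e2] at hlt ⊢
      rw [if_neg hlt]
  | case3 p1 p2 s arr h =>
      rw [pvTailLoopA_eq, pvTailLoopA_eq]
      rcases Nat.lt_or_ge p1 L.length with h1 | h1
      · have h2 : R.length ≤ p2 := by omega
        rw [List.drop_eq_getElem_cons h1, List.drop_eq_nil_of_le h2, pvMergeS]
        simp
      · rw [List.drop_eq_nil_of_le h1]
        cases hR : R.drop p2 with
        | nil => rw [pvMergeS]; simp
        | cons y rs => rw [pvMergeS]; simp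

-- the two exhausted-side equations of the tagged merge
theorem pvTagMerge_nil_left (r : List Int) :
    pvTagMerge [] r = r.map (fun y => (y, false)) := by
  cases r <;> simp [pvTagMerge]

theorem pvTagMerge_nil_right (l : List Int) :
    pvTagMerge l [] = l.map (fun x => (x, true)) := by
  cases l <;> simp [pvTagMerge]

-- the backward scan over a purely L-tagged / purely R-tagged tail
theorem pvSufSum_allTrue (l : List Int) :
    pvSufSum (l.map (fun x => (x, true))) = (0, 0) := by
  induction l with
  | nil => simp [pvSufSum]
  | cons x ls ih => simp [pvSufSum, ih]

theorem pvSufSum_allFalse (r : List Int) :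
    pvSufSum (r.map (fun y => (y, false))) = (0, (r.length : Int)) := by
  induction r with
  | nil => simp [pvSufSum]
  | cons y rs ih => simp [pvSufSum, ih]

-- the R-tag count of the tagged merge is the length of the right list
theorem pvSufSum_tag_count (l r : List Int) :
    (pvSufSum (pvTagMerge l r)).2 = (r.length : Int) := by
  fun_induction pvTagMerge l r with
  | case1 x ls y rs hxy ih => simp [pvSufSum, ih]
  | case2 x ls y rs hxy ih => simp [pvSufSum, ih]
  | case3 l => rw [pvSufSum_allTrue]; simp
  | case4 r => rw [pvSufSum_allFalse]

-- A's merge loop computes B's backward-scan total and the untagged merge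
theorem pvMergeS_eq_tag (l r : List Int) (s : Int) (arr : List Int) :
    pvMergeS l r s arr
      = (s + (pvSufSum (pvTagMerge l r)).1, arr ++ (pvTagMerge l r).map Prod.fst) := by
  fun_induction pvMergeS l r s arr with
  | case1 s arr x ls y rs hxy ih =>
      rw [ih]
      rw [pvTagMerge, if_pos hxy]
      simp only [pvSufSum, List.map_cons]
      rw [pvSufSum_tag_count ls (y :: rs)]
      simp only [Prod.mk.injEq]
      constructor
      · push_cast; ring
      · simp
  | case2 s arr x ls y rs hxy ih =>
      rw [ih]
      rw [pvTagMerge, if_neg hxy]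
      simp only [pvSufSum, List.map_cons]
      simp
  | case3 s arr l r h =>
      match l, r with
      | [], r =>
          cases r with
          | nil => simp [pvTagMerge, pvSufSum]
          | cons y rs =>
              rw [pvTagMerge_nil_left, pvSufSum_allFalse]
              simp [List.map_map, Function.comp_def]
      | x :: ls, [] =>
          rw [pvTagMerge_nil_right, pvSufSum_allTrue]
          simp [List.map_map, Function.comp_def]
      | x :: ls, y :: rs => exact (h x ls y rs rfl rfl).elim

-- a fold that ignores the elements is an iterate of the step
theorem pvFoldl_const {α β : Type} (g : α → α) :
    ∀ (l : List β) (s : α), l.foldl (fun st _ => g st) s = g^[l.length] s := by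
  intro l
  induction l with
  | nil => intro s; simp
  | cons x xs ih =>
      intro s
      rw [List.foldl_cons, ih, List.length_cons, Function.iterate_succ_apply]

-- invariant of B's selection loop: consuming the remaining suffixes appends their tagged merge
theorem pvIterB (L R : List Int) :
    ∀ (k i j : Nat) (acc : List (Int × Bool)),
      (L.length - i) + (R.length - j) = k → i ≤ L.length → j ≤ R.length →
      (pvStepB L R)^[k] (i, j, acc)
        = (L.length, R.length, acc ++ pvTagMerge (L.drop i) (R.drop j)) := by
  intro k
  induction k with
  | zero =>
      intro i j acc hk hi hj
      have hi' : i = L.length := by omega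
      have hj' : j = R.length := by omega
      subst hi'; subst hj'
      simp [List.drop_eq_nil_of_le, pvTagMerge]
  | succ k ih =>
      intro i j acc hk hi hj
      rw [Function.iterate_succ_apply]
      rcases Nat.lt_or_ge j R.length with hjm | hjm
      · have h1 : ¬ (j ≥ R.length) := by omega
        have e2 : R.getD j 0 = R[j] := List.getD_eq_getElem R 0 hjm
        rcases Nat.lt_or_ge i L.length with hin | hin
        · have e1 : L.getD i 0 = L[i] := List.getD_eq_getElem L 0 hin
          by_cases hcmp : L.getD i 0 < R.getD j 0
          · -- take from L
            have hstep : pvStepB L R (i, j, acc) = (i + 1, j, acc ++ [(L.getD i 0, true)]) := by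
              simp only [pvStepB]
              rw [decide_eq_false h1, decide_eq_true hin, decide_eq_true hcmp]
              rfl
            rw [hstep, ih (i + 1) j _ (by omega) (by omega) (by omega),
              List.drop_eq_getElem_cons hin, List.drop_eq_getElem_cons hjm, pvTagMerge]
            have hc : L[i] < R[j] := by rw [e1, e2] at hcmp; exact hcmp
            rw [if_pos hc, e1]
            simp
          · -- take from R
            have hstep : pvStepB L R (i, j, acc) = (i, j + 1, acc ++ [(R.getD j 0, false)]) := by
              simp only [pvStepB]
              rw [decide_eq_false h1, decide_eq_true hin, decide_eq_false hcmp]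
              rfl
            rw [hstep, ih i (j + 1) _ (by omega) (by omega) (by omega),
              List.drop_eq_getElem_cons hin, List.drop_eq_getElem_cons hjm, pvTagMerge]
            have hc : ¬ (L[i] < R[j]) := by rw [e1, e2] at hcmp; exact hcmp
            rw [if_neg hc, e2]
            simp
        · -- L exhausted: take from R
          have hstep : pvStepB L R (i, j, acc) = (i, j + 1, acc ++ [(R.getD j 0, false)]) := by
            simp only [pvStepB]
            rw [decide_eq_false h1, decide_eq_false (by omega : ¬ (i < L.length))]
            rfl
          rw [hstep, ih i (j + 1) _ (by omega) (by omega) (by omega),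
            List.drop_eq_nil_of_le hin, pvTagMerge_nil_left, pvTagMerge_nil_left,
            List.drop_eq_getElem_cons hjm, List.map_cons, e2]
          simp
      · -- R exhausted: take from L
        have hin : i < L.length := by omega
        have e1 : L.getD i 0 = L[i] := List.getD_eq_getElem L 0 hin
        have hstep : pvStepB L R (i, j, acc) = (i + 1, j, acc ++ [(L.getD i 0, true)]) := by
          simp only [pvStepB]
          rw [decide_eq_true hjm]
          rfl
        rw [hstep, ih (i + 1) j _ (by omega) (by omega) (by omega),
          List.drop_eq_nil_of_le hjm, pvTagMerge_nil_right, pvTagMerge_nil_right,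
          List.drop_eq_getElem_cons hin, List.map_cons, e1]
        simp

-- B's backward foldl over the reversed list is the structural pvSufSum
theorem pvRevScan_eq (t : List (Int × Bool)) :
    t.reverse.foldl
      (fun (tc : Int × Int) (vb : Int × Bool) =>
        if vb.2 then (tc.1 + vb.1 * tc.2, tc.2) else (tc.1, tc.2 + 1)) (0, 0)
      = pvSufSum t := by
  rw [List.foldl_reverse]
  induction t with
  | nil => simp [pvSufSum]
  | cons vb t ih =>
      rw [List.foldr_cons, ih]
      cases vb with
      | mk v b => cases b <;> simp [pvSufSum]

-- ===== VERDICT (by name: the statement is the Claim_ definition above) =====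
theorem mergSum_spec : Claim_equal_mergSum := by
  intro L R _
  unfold Spec_mergSum mergSum mergSum_alt
  rw [pvMergeLoopA_eq_pvMergeS, List.drop_zero, List.drop_zero, pvMergeS_eq_tag]
  simp only [pvFoldl_const (pvStepB L R), List.length_range]
  rw [pvIterB L R (L.length + R.length) 0 0 [] (by omega) (by omega) (by omega)]
  simp only [List.drop_zero, List.nil_append]
  rw [pvRevScan_eq]
  simp
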